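-- pv_equiv track=rewrite | github.com/AtlasOfArthur/mooc-ohjelmointi-2022 | osa04-25_naapureita_listassa/src/naapureita_listassa.py | pisin_naapurijono
-- ===== SOURCE A (Python) =====
-- def pisin_naapurijono(lista):
--     pituus = 1
--     pituus_tilapainen = 1
--
--     for indx in range(1, len(lista)):
--         if lista[indx] == lista[indx - 1] + 1 or lista[indx] == lista[indx - 1] - 1:
--             pituus_tilapainen += 1
--         else:
--             pituus_tilapainen = 1
--
--         if pituus_tilapainen > pituus:
--             pituus = pituus_tilapainen
--
--     return pituus
-- ===== SOURCE B (Python) =====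
-- def pisin_naapurijono(lista):
--     # Phase 1: pairwise adjacency flags; Phase 2: longest run of True, +1.
--     flags = [abs(a - b) == 1 for a, b in zip(lista[1:], lista)]
--     longest = 0
--     i = 0
--     while i < len(flags):
--         if flags[i]:
--             j = i
--             while j < len(flags) and flags[j]:
--                 j += 1
--             if j - i > longest:
--                 longest = j - i
--             i = j
--         else:
--             i += 1
--     return longest + 1
-- ===== Notes on version B (the rewrite author's own statement) =====
-- stated objective: alternative
-- what changed: Replaces A's fused best/current accumulator loop with a two-phase pipeline: first build the list of pairwise-adjacency flags, then scan it for the longest maximal run of True and return that run length plus one.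
import Mathlib
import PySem

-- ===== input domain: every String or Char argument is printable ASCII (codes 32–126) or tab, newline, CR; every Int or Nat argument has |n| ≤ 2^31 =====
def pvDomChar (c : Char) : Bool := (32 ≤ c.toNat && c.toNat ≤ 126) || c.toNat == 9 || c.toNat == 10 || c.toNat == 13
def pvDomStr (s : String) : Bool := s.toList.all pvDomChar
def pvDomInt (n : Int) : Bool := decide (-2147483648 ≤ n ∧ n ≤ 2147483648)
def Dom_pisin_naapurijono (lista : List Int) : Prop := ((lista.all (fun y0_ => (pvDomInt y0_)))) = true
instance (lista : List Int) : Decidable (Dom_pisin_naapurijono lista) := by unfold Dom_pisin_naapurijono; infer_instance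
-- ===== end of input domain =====

-- B replaces A's fused best/current accumulator loop with a two-phase pipeline
-- (pairwise adjacency flags, then longest run of True, +1); alternative decomposition, same cost.


-- ===== PORT A =====
def pisin_naapurijono (lista : List Int) : Int :=
  let st := (PySem.List.pyRange 1 (lista.length : Int) 1).foldl
    (fun (st : Int × Int) indx =>
      let tila' :=
        if PySem.List.pyGetD lista indx 0 = PySem.List.pyGetD lista (indx - 1) 0 + 1 ∨
           PySem.List.pyGetD lista indx 0 = PySem.List.pyGetD lista (indx - 1) 0 - 1
        then st.2 + 1 else 1
      (if tila' > st.1 then tila' else st.1, tila'))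
    (1, 1)
  st.1

-- ===== PORT B =====
-- helper: length of the leading run of `true` (the inner `while j ...` scan of Source B)
def pvLead (fs : List Bool) : Nat := (fs.takeWhile (· == true)).length

-- the outer scan of Source B: longest maximal run of `true` in the flags list
def pvLongestRun : List Bool → Nat
  | [] => 0
  | false :: fs => pvLongestRun fs
  | true :: fs => max (pvLead fs + 1) (pvLongestRun (fs.drop (pvLead fs)))
termination_by fs => fs.length
decreasing_by
  · simp
  · simp [pvLead]

def pisin_naapurijono_alt (lista : List Int) : Int :=
  let flags := ((lista.drop 1).zip lista).map (fun p => (p.1 - p.2).natAbs == 1)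
  (pvLongestRun flags : Int) + 1

-- ===== PRECONDITION & SPEC =====
def Spec_pisin_naapurijono (lista : List Int) (out : Int) : Prop := out = pisin_naapurijono_alt lista
instance (lista : List Int) (out : Int) : Decidable (Spec_pisin_naapurijono lista out) := by unfold Spec_pisin_naapurijono; infer_instance

-- ===== CLAIM (what is proved, stated in full; the proofs are below) =====
def Claim_equal_pisin_naapurijono : Prop := ∀ (lista : List Int), Dom_pisin_naapurijono lista → Spec_pisin_naapurijono lista (pisin_naapurijono lista)

-- ===== LEMMAS AND PROOFS =====

-- A's loop step, expressed on the boolean adjacency flag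
def pvStep (st : Int × Int) (f : Bool) : Int × Int :=
  let tila' := if f then st.2 + 1 else 1
  (if tila' > st.1 then tila' else st.1, tila')

-- maximum streak value reached in the future, current streak value c
def pvN : List Bool → Int → Int
  | [], c => c
  | true :: fs, c => max (c + 1) (pvN fs (c + 1))
  | false :: fs, _ => max 1 (pvN fs 1)

lemma pvStep_false (b c : Int) : pvStep (b, c) false = (max b 1, 1) := by
  simp [pvStep, Prod.ext_iff] <;> split_ifs <;> omega

lemma pvStep_true (b c : Int) : pvStep (b, c) true = (max b (c + 1), c + 1) := by
  simp [pvStep, Prod.ext_iff] <;> split_ifs <;> omega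

lemma pvLongestRun_false (fs : List Bool) : pvLongestRun (false :: fs) = pvLongestRun fs := by
  rw [pvLongestRun]

lemma pvLongestRun_true (fs : List Bool) :
    pvLongestRun (true :: fs) = max (pvLead fs + 1) (pvLongestRun (fs.drop (pvLead fs))) := by
  rw [pvLongestRun]

lemma foldl_step (fs : List Bool) (b c : Int) (h1 : 1 ≤ c) (h2 : c ≤ b) :
    (fs.foldl pvStep (b, c)).1 = max b (pvN fs c) := by
  induction fs generalizing b c with
  | nil => simp [pvN]; omega
  | cons f fs ih =>
    cases f
    · rw [List.foldl_cons, pvStep_false, ih (max b 1) 1 (by omega) (by omega)]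
      simp only [pvN]; omega
    · rw [List.foldl_cons, pvStep_true, ih (max b (c + 1)) (c + 1) (by omega) (by omega)]
      simp only [pvN]; omega

lemma pvLead_le (fs : List Bool) : pvLead fs ≤ pvLongestRun fs := by
  cases fs with
  | nil => simp [pvLead, pvLongestRun]
  | cons f fs =>
    cases f
    · simp [pvLead, List.takeWhile]
    · rw [pvLongestRun]
      simp [pvLead, List.takeWhile]

lemma pvLongestRun_eq (fs : List Bool) :
    pvLongestRun fs = max (pvLead fs) (pvLongestRun (fs.drop (pvLead fs))) := by
  cases fs with
  | nil => simp [pvLead, pvLongestRun]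
  | cons f fs =>
    cases f
    · rw [pvLongestRun_false]
      simp [pvLead, List.takeWhile, pvLongestRun_false]
    · rw [pvLongestRun_true]
      simp [pvLead, List.takeWhile]

lemma pvN_reach (fs : List Bool) (c : Int) (h1 : 1 ≤ c) (hne : fs ≠ []) :
    pvN fs c = max (if 0 < pvLead fs then c + pvLead fs else 0) (1 + (pvLongestRun fs : Int)) := by
  induction fs generalizing c with
  | nil => exact absurd rfl hne
  | cons f fs ih =>
    rcases fs with _ | ⟨f', fs'⟩
    · cases f
      · simp [pvN, pvLead, List.takeWhile, pvLongestRun]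
      · rw [pvLongestRun]
        simp [pvN, pvLead, List.takeWhile, pvLongestRun]
        omega
    · have hne' : (f' :: fs') ≠ ([] : List Bool) := by simp
      cases f
      · -- head false: streak resets to 1
        rw [pvN, ih 1 (by omega) hne']
        have hlead0 : pvLead (false :: f' :: fs') = 0 := by
          simp [pvLead, List.takeWhile]
        have hL : pvLongestRun (false :: f' :: fs') = pvLongestRun (f' :: fs') := by
          rw [pvLongestRun]
        have hle := pvLead_le (f' :: fs')
        rw [hlead0, hL]
        split_ifs with h
        all_goals omega
      · -- head true: streak extends
        rw [pvN, ih (c + 1) (by omega) hne']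
        have hlead : pvLead (true :: f' :: fs') = pvLead (f' :: fs') + 1 := by
          simp [pvLead, List.takeWhile]
        have hL : pvLongestRun (true :: f' :: fs') =
            max (pvLead (f' :: fs') + 1) (pvLongestRun ((f' :: fs').drop (pvLead (f' :: fs')))) := by
          rw [pvLongestRun]
        have hLe : pvLongestRun (f' :: fs') =
            max (pvLead (f' :: fs')) (pvLongestRun ((f' :: fs').drop (pvLead (f' :: fs')))) :=
          pvLongestRun_eq _
        have hle := pvLead_le (f' :: fs')
        rw [hlead, hL]
        split_ifs with h h'
        all_goals (push_cast [hLe]; omega)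

lemma pvN_one (fs : List Bool) : max 1 (pvN fs 1) = (pvLongestRun fs : Int) + 1 := by
  rcases fs with _ | ⟨f, fs⟩
  · simp [pvN, pvLongestRun]
  · rw [pvN_reach (f :: fs) 1 (by omega) (by simp)]
    have h2 : pvLead (f :: fs) ≤ pvLongestRun (f :: fs) := pvLead_le _
    split_ifs with h
    all_goals (push_cast; omega)

-- the range-indexed (current, previous) pair view equals zip of the tail with the list
lemma pairs_eq (lista : List Int) :
    (PySem.List.pyRange 1 (lista.length : Int) 1).map
      (fun j => (PySem.List.pyGetD lista j 0, PySem.List.pyGetD lista (j - 1) 0))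
    = (lista.drop 1).zip lista := by
  rw [PySem.List.pyRange_one]
  apply List.ext_getElem
  · simp <;> omega
  · intro i h1 h2
    have hi : i + 1 < lista.length := by
      simp only [List.length_map, List.length_range] at h1; omega
    simp only [List.getElem_map, List.getElem_range, List.getElem_zip, List.getElem_drop]
    rw [PySem.List.pyGetD_eq_getElem lista 0 (by omega) (by push_cast; omega),
        PySem.List.pyGetD_eq_getElem lista 0 (by omega) (by push_cast; omega)]
    congr 2 <;> omega

lemma main_eq (lista : List Int) : pisin_naapurijono lista = pisin_naapurijono_alt lista := by
  unfold pisin_naapurijono pisin_naapurijono_alt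
  have hfold :
      (PySem.List.pyRange 1 (lista.length : Int) 1).foldl
        (fun (st : Int × Int) indx =>
          let tila' :=
            if PySem.List.pyGetD lista indx 0 = PySem.List.pyGetD lista (indx - 1) 0 + 1 ∨
               PySem.List.pyGetD lista indx 0 = PySem.List.pyGetD lista (indx - 1) 0 - 1
            then st.2 + 1 else 1
          (if tila' > st.1 then tila' else st.1, tila')) (1, 1)
      = (((lista.drop 1).zip lista).map (fun p => (p.1 - p.2).natAbs == 1)).foldl pvStep (1, 1) := by
    rw [List.foldl_map, ← pairs_eq lista, List.foldl_map]
    apply PySem.List.foldl_congr_mem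
    intro st j _
    simp only [pvStep]
    have hiff :
        (PySem.List.pyGetD lista j 0 = PySem.List.pyGetD lista (j - 1) 0 + 1 ∨
         PySem.List.pyGetD lista j 0 = PySem.List.pyGetD lista (j - 1) 0 - 1)
        ↔ ((PySem.List.pyGetD lista j 0 - PySem.List.pyGetD lista (j - 1) 0).natAbs == 1) = true := by
      simp only [beq_iff_eq]
      omega
    rw [if_congr hiff rfl rfl]
  simp only [hfold]
  rw [foldl_step _ 1 1 (by omega) (by omega), pvN_one]

-- ===== VERDICT (by name: the statement is the Claim_ definition above) =====
theorem pisin_naapurijono_spec : Claim_equal_pisin_naapurijono := by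
  intro lista _
  unfold Spec_pisin_naapurijono
  exact main_eq lista
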